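-- pv_equiv track=rewrite | github.com/henriquealvesgonzaga87/UpSkill | Enunciados_Final_Aulas/Enunciados_Final_Aulas/VetoresOrdenacaoFicheirosCSV_Lista_Dicionario/CSV_FicheirosExemplo/read_TXT_file_base.py | pessoasxnome
-- ===== SOURCE A (Python) =====
-- def pessoasxnome(lista):
--     nomes = []
--     qts = []
--     for x in lista:
--         primeironome = x[1].split(" ")[0]
--         if primeironome in nomes:
--             p = nomes.index(primeironome)
--             qts[p] = qts[p]+1
--         else:
--             nomes.append(primeironome)
--             qts.append(1)
--     return list(zip(nomes, qts))
-- ===== SOURCE B (Python) =====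
-- def pessoasxnome(lista):
--     # pass 1: extract all first names
--     nomes = [x[1].split(" ")[0] for x in lista]
--     # pass 2: distinct names in first-appearance order
--     distinct = []
--     for n in nomes:
--         if n not in distinct:
--             distinct.append(n)
--     # pass 3: count each distinct name in the full list
--     return [(n, nomes.count(n)) for n in distinct]
-- ===== Notes on version B (the rewrite author's own statement) =====
-- stated objective: alternative
-- what changed: Replaces A's single interleaved pass maintaining parallel nomes/qts lists with index lookups and in-place increments by three separate passes: extract all first names, dedup in order, then count each distinct name over the full name list.
import Mathlib
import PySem

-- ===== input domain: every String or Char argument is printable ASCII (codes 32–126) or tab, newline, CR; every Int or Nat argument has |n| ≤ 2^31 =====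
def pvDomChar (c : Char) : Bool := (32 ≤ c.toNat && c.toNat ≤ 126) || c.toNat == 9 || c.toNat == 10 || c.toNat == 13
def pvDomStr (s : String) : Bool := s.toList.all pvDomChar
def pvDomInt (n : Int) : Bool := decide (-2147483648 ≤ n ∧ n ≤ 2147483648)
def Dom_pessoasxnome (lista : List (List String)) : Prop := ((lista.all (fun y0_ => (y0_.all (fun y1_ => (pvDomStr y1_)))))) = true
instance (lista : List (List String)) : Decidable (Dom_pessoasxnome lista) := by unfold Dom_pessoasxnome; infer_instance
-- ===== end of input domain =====

-- B re-decomposes A's single interleaved counting pass into three separate passes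
-- (extract first names, dedup in order, count each distinct name); same cost, return value proved equal.

-- x[1].split(" ")[0]  — appears literally in both A and B; total under Pre_ (row length ≥ 2);
-- split(sep) on a nonempty sep always returns a nonempty list, so headD is exact.
def pvFirstName (x : List String) : String :=
  ((PySem.Str.split? (PySem.List.pyGetD x 1 "") " ").getD []).headD ""

-- ===== PORT A =====
def pessoasxnomeLoop : List (List String) → List String → List Int → List String × List Int
  | [], nomes, qts => (nomes, qts)
  | x :: rest, nomes, qts =>
    let pn := pvFirstName x
    if nomes.contains pn then
      -- p = nomes.index(pn); the `in` guard guarantees the index exists and is in range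
      let p := (PySem.List.index? nomes pn).getD 0
      pessoasxnomeLoop rest nomes (qts.set p (qts.getD p 0 + 1))
    else
      pessoasxnomeLoop rest (nomes ++ [pn]) (qts ++ [1])

def pessoasxnome (lista : List (List String)) : List (String × Int) :=
  let r := pessoasxnomeLoop lista [] []
  r.1.zip r.2

-- ===== PORT B =====
def pessoasxnome_alt (lista : List (List String)) : List (String × Int) :=
  let nomes := lista.map pvFirstName
  let distinct := nomes.foldl (fun acc n => if acc.contains n then acc else acc ++ [n]) []
  distinct.map (fun n => (n, (PySem.List.count nomes n : Int)))

-- ===== PRECONDITION & SPEC =====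
-- Pre_ excludes exactly the rows on which Python A raises IndexError (x[1] with len(x) < 2).
def Pre_pessoasxnome (lista : List (List String)) : Prop := ∀ x ∈ lista, 2 ≤ x.length
instance (lista : List (List String)) : Decidable (Pre_pessoasxnome lista) := by unfold Pre_pessoasxnome; infer_instance

def pvWitness_pessoasxnome : List (List String) :=
  [["1", "Ana Silva"], ["2", "Ana Costa"], ["3", "Bo X"]]

def Spec_pessoasxnome (lista : List (List String)) (out : List (String × Int)) : Prop := out = pessoasxnome_alt lista
instance (lista : List (List String)) (out : List (String × Int)) : Decidable (Spec_pessoasxnome lista out) := by unfold Spec_pessoasxnome; infer_instance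

-- ===== CLAIM (what is proved, stated in full; the proofs are below) =====
def Claim_equal_pessoasxnome : Prop := ∀ (lista : List (List String)), Dom_pessoasxnome lista → Pre_pessoasxnome lista → Spec_pessoasxnome lista (pessoasxnome lista)

-- ===== LEMMAS AND PROOFS =====

-- A's loop, abstracted to act on the already-extracted name list
def pvLoopN : List String → List String → List Int → List String × List Int
  | [], nomes, qts => (nomes, qts)
  | n :: rest, nomes, qts =>
    if nomes.contains n then
      let p := (PySem.List.index? nomes n).getD 0
      pvLoopN rest nomes (qts.set p (qts.getD p 0 + 1))
    else
      pvLoopN rest (nomes ++ [n]) (qts ++ [1])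

lemma pvLoop_eq_loopN (lista : List (List String)) (ns : List String) (qs : List Int) :
    pessoasxnomeLoop lista ns qs = pvLoopN (lista.map pvFirstName) ns qs := by
  induction lista generalizing ns qs with
  | nil => rfl
  | cons x rest ih =>
    simp only [pessoasxnomeLoop, pvLoopN, List.map_cons]
    split_ifs <;> exact ih _ _

def pvDedup (seen : List String) : List String :=
  seen.foldl (fun acc n => if acc.contains n then acc else acc ++ [n]) []

lemma pvDedup_append_singleton (seen : List String) (n : String) :
    pvDedup (seen ++ [n]) =
      if (pvDedup seen).contains n then pvDedup seen else pvDedup seen ++ [n] := by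
  simp [pvDedup, List.foldl_append]

lemma pvDedup_aux_mem (seen acc : List String) (n : String) :
    n ∈ seen.foldl (fun acc n => if acc.contains n then acc else acc ++ [n]) acc ↔
      n ∈ acc ∨ n ∈ seen := by
  induction seen generalizing acc with
  | nil => simp
  | cons s rest ih =>
    simp only [List.foldl_cons]
    split_ifs with h
    · rw [ih]
      simp only [List.contains_iff_mem, decide_eq_true_eq] at h
      simp only [List.mem_cons]
      constructor
      · tauto
      · rintro (ha | rfl | hr)
        · exact Or.inl ha
        · exact Or.inl h
        · exact Or.inr hr
    · rw [ih]
      simp only [List.mem_append, List.mem_singleton, List.mem_cons]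
      tauto
  
lemma pvDedup_mem (seen : List String) (n : String) : n ∈ pvDedup seen ↔ n ∈ seen := by
  rw [pvDedup, pvDedup_aux_mem]; simp

lemma pvDedup_aux_nodup (seen acc : List String) (h : acc.Nodup) :
    (seen.foldl (fun acc n => if acc.contains n then acc else acc ++ [n]) acc).Nodup := by
  induction seen generalizing acc with
  | nil => exact h
  | cons s rest ih =>
    simp only [List.foldl_cons]
    split_ifs with hc
    · exact ih _ h
    · refine ih _ ?_
      have hs : s ∉ acc := by simpa using hc
      simp only [List.nodup_append, List.nodup_singleton, true_and]
      refine ⟨h, ?_⟩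
      intro a ha b hb
      simp only [List.mem_singleton] at hb
      subst hb
      exact fun he => hs (he ▸ ha)

lemma pvDedup_nodup (seen : List String) : (pvDedup seen).Nodup :=
  pvDedup_aux_nodup seen [] List.nodup_nil

-- the central invariant: running A's loop from the state describing `seen`
-- lands in the state describing `seen ++ rest`
lemma pvLoopN_invariant (rest seen : List String) :
    pvLoopN rest (pvDedup seen) ((pvDedup seen).map (fun n => (List.count n seen : Int))) =
      (pvDedup (seen ++ rest),
       (pvDedup (seen ++ rest)).map (fun n => (List.count n (seen ++ rest) : Int))) := by
  induction rest generalizing seen with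
  | nil => simp [pvLoopN]
  | cons m rest ih =>
    by_cases hm : m ∈ seen
    · -- member branch: increment the count at m's index
      have hcont : (pvDedup seen).contains m = true := by
        simp [List.contains_iff_mem, pvDedup_mem, hm]
      simp only [pvLoopN, hcont, if_true]
      have hmemd : m ∈ pvDedup seen := (pvDedup_mem seen m).mpr hm
      obtain ⟨k, hk⟩ := Option.isSome_iff_exists.mp
        ((PySem.List.index?_isSome_iff (xs := pvDedup seen) (v := m)).mpr hmemd)
      obtain ⟨hklt, hkm, hbefore⟩ := PySem.List.getElem_of_index?_eq_some hk
      have hset :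
          ((pvDedup seen).map (fun n => (List.count n seen : Int))).set
              ((PySem.List.index? (pvDedup seen) m).getD 0)
              (((pvDedup seen).map (fun n => (List.count n seen : Int))).getD
                ((PySem.List.index? (pvDedup seen) m).getD 0) 0 + 1) =
            (pvDedup seen).map (fun n => (List.count n (seen ++ [m]) : Int)) := by
        rw [hk]
        apply List.ext_getElem
        · simp
        · intro j hj1 hj2
          simp only [Option.getD_some] at *
          by_cases hjk : j = k
          · subst hjk
            rw [List.getElem_set_self]
            · simp only [List.getD_eq_getElem?_getD, List.getElem?_map]
              simp only [List.getElem?_eq_getElem hklt, Option.map_some, Option.getD_some, hkm,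
                List.getElem_map, List.count_append, List.count_singleton,
                beq_self_eq_true, if_true]
              push_cast; ring
          · rw [List.getElem_set_ne (by omega)]
            have hlt' : j < (pvDedup seen).length := by simpa using hj2
            have hne : (pvDedup seen)[j] ≠ m := by
              intro he
              have := (List.nodup_iff_injective_getElem.mp (pvDedup_nodup seen))
              exact hjk (by
                have : (⟨j, hlt'⟩ : Fin _) = ⟨k, hklt⟩ := this (by simp [he, hkm])
                simpa using congrArg Fin.val this)
            simp [List.count_append, List.count_singleton, hne] <;>
              exact fun he => hne he.symm
      have hded : pvDedup (seen ++ [m]) = pvDedup seen := by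
        rw [pvDedup_append_singleton, hcont]; simp
      have := ih (seen ++ [m])
      rw [hded] at this
      rw [hset, this]
      simp
    · -- new-name branch: append the name with count 1
      have hcont : (pvDedup seen).contains m = false := by
        simp [List.contains_iff_mem, pvDedup_mem, hm]
      simp only [pvLoopN, hcont, Bool.false_eq_true, if_false]
      have hded : pvDedup (seen ++ [m]) = pvDedup seen ++ [m] := by
        rw [pvDedup_append_singleton, hcont]; simp
      have hmap :
          (pvDedup seen).map (fun n => (List.count n seen : Int)) ++ [1] =
            (pvDedup seen ++ [m]).map (fun n => (List.count n (seen ++ [m]) : Int)) := by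
        rw [List.map_append]
        congr 1
        · apply List.map_congr_left
          intro n hn
          have hne : n ≠ m := by
            intro he; exact hm ((pvDedup_mem seen m).mp (he ▸ hn))
          simp [List.count_append, List.count_singleton, hne] <;>
            exact fun he => hne he.symm
        · simp [List.count_append, List.count_singleton, List.count_eq_zero_of_not_mem hm]
      rw [hmap, List.append_cons seen m rest, ← hded]
      exact ih (seen ++ [m])
  
lemma pvZip_map (ds : List String) (f : String → Int) :
    ds.zip (ds.map f) = ds.map (fun n => (n, f n)) := by
  induction ds with
  | nil => rfl
  | cons d rest ih => simp [ih]

lemma pvLoopN_from_nil (names : List String) :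
    pvLoopN names [] [] =
      (pvDedup names, (pvDedup names).map (fun n => (List.count n names : Int))) := by
  have h := pvLoopN_invariant names []
  simpa using h

-- ===== VERDICT (by name: the statement is the Claim_ definition above) =====
theorem pessoasxnome_spec : Claim_equal_pessoasxnome := by
  intro lista _ _
  show pessoasxnome lista = pessoasxnome_alt lista
  unfold pessoasxnome pessoasxnome_alt
  rw [pvLoop_eq_loopN, pvLoopN_from_nil, pvZip_map]
  simp [pvDedup, PySem.List.count_eq]
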